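-- pv_equiv track=rewrite | github.com/EduardDek/ML-lvl-0-Homeworks | week 4/multiply_matrices - read by slice(dictionary).py | median_space
-- ===== SOURCE A (Python) =====
-- def median_space(txt):
--     spacecount = len(txt)-len(txt.replace(" ",""))+1
--     if spacecount == 0:
--         return len(txt)
--     med_space = spacecount//2
--     counter = 0
--     final = -1
--     for i in txt:
--         final +=1
--         if i == " ":
--             counter+=1
--             if counter == med_space:
--                 return final
-- ===== SOURCE B (Python) =====
-- def median_space(txt):
--     idx = [i for i, c in enumerate(txt) if c == " "]
--     med = (len(idx) + 1) // 2
--     return idx[med - 1]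
-- ===== Notes on version B (the rewrite author's own statement) =====
-- stated objective: simpler
-- what changed: B materializes the list of space positions once (enumerate + comprehension) and returns the median position by arithmetic indexing, replacing A's replace-based space count, dead spacecount==0 branch, and counter loop that short-circuits at the median space.
-- outside the precondition, e.g. on median_space('abc'): A returns None, B raises IndexError
import Mathlib
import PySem

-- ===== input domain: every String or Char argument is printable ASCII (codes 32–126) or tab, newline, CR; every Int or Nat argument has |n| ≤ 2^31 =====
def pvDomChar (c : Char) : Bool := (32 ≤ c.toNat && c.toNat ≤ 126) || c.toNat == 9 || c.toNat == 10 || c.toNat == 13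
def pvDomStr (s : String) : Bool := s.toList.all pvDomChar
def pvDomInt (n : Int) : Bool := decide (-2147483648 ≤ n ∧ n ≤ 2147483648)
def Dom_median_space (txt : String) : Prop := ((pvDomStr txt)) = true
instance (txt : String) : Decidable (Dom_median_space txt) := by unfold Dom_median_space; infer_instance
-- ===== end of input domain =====

-- B collects all space positions once and indexes the median arithmetically, instead of A's
-- counting loop that short-circuits at the median space (objective: simpler; return value only).

-- ===== PORT A =====
-- the for-loop of A with its counter/final state; returns none when the loop falls through
def medianSpaceLoopA : List Char → Int → Int → Int → Option Int
  | [], _, _, _ => none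
  | c :: t, med, counter, final =>
    if c = ' ' then
      if counter + 1 = med then some (final + 1)
      else medianSpaceLoopA t med (counter + 1) (final + 1)
    else medianSpaceLoopA t med counter (final + 1)

def median_space (txt : String) : Int :=
  let spacecount : Int :=
    PySem.Str.len txt - PySem.Str.len (PySem.Str.replace txt " " "") + 1
  if spacecount = 0 then PySem.Str.len txt
  else
    let med_space := PySem.Int.floordiv spacecount 2
    -- Python falls through with None on space-free input; excluded by Pre_, default 0 here
    (medianSpaceLoopA txt.toList med_space 0 (-1)).getD 0

-- ===== PORT B =====
def median_space_alt (txt : String) : Int :=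
  let idx := (PySem.List.enumerate txt.toList 0).filterMap
    (fun p => if p.2 = ' ' then some p.1 else none)
  let med := PySem.Int.floordiv (PySem.List.len idx + 1) 2
  -- Python raises IndexError on empty idx; excluded by Pre_, default 0 here
  (PySem.List.pyGet? idx (med - 1)).getD 0

-- ===== PRECONDITION & SPEC =====
-- Pre_ excludes space-free strings: there A's loop falls through and returns None (no Int), and B raises IndexError.
def Pre_median_space (txt : String) : Prop := ' ' ∈ txt.toList
instance (txt : String) : Decidable (Pre_median_space txt) := by unfold Pre_median_space; infer_instance
def pvWitness_median_space : String := "a b"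

def Spec_median_space (txt : String) (out : Int) : Prop := out = median_space_alt txt
instance (txt : String) (out : Int) : Decidable (Spec_median_space txt out) := by unfold Spec_median_space; infer_instance

-- ===== CLAIM (what is proved, stated in full; the proofs are below) =====
def Claim_equal_median_space : Prop := ∀ (txt : String), Dom_median_space txt → Pre_median_space txt → Spec_median_space txt (median_space txt)

-- ===== LEMMAS AND PROOFS =====

-- the list of space positions of l, first position labelled b
def spIdx : List Char → Int → List Int
  | [], _ => []
  | c :: t, b => if c = ' ' then b :: spIdx t (b + 1) else spIdx t (b + 1)

theorem spIdx_length (l : List Char) (b : Int) :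
    (spIdx l b).length = l.countP (· = ' ') := by
  induction l generalizing b with
  | nil => simp [spIdx]
  | cons c t ih =>
    by_cases hc : c = ' ' <;> simp [spIdx, hc, ih]

theorem filterMap_enumerate_eq_spIdx (l : List Char) (b : Int) :
    (PySem.List.enumerate l b).filterMap
      (fun p => if p.2 = ' ' then some p.1 else none) = spIdx l b := by
  induction l generalizing b with
  | nil => simp [spIdx, PySem.List.enumerate_nil]
  | cons c t ih =>
    by_cases hc : c = ' ' <;>
      simp [spIdx, hc, PySem.List.enumerate_cons, ih]

theorem pyGet?_cons_of_pos (x : Int) (xs : List Int) (j : Int) (hj : 0 ≤ j) :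
    PySem.List.pyGet? (x :: xs) (j + 1) = PySem.List.pyGet? xs j := by
  rw [PySem.List.pyGet?_of_nonneg _ (by omega : (0:Int) ≤ j + 1), PySem.List.pyGet?_of_nonneg _ hj]
  have : (j + 1).toNat = j.toNat + 1 := by omega
  simp [this]

theorem loopA_eq_pyGet (l : List Char) (med counter final : Int)
    (h : counter < med) :
    medianSpaceLoopA l med counter final =
      PySem.List.pyGet? (spIdx l (final + 1)) (med - counter - 1) := by
  induction l generalizing counter final with
  | nil => simp [medianSpaceLoopA, spIdx, PySem.List.pyGet?]
  | cons c t ih =>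
    by_cases hc : c = ' '
    · by_cases hmed : counter + 1 = med
      · have h0 : med - counter - 1 = 0 := by omega
        simp [medianSpaceLoopA, spIdx, hc, hmed, h0]
      · have hlt : counter + 1 < med := by omega
        have hstep : med - counter - 1 = (med - (counter + 1) - 1) + 1 := by ring
        rw [medianSpaceLoopA, if_pos hc, if_neg hmed, ih (counter + 1) (final + 1) hlt]
        rw [spIdx, if_pos hc, hstep,
          pyGet?_cons_of_pos _ _ _ (by omega)]
    · rw [medianSpaceLoopA, if_neg hc, ih counter (final + 1) h, spIdx, if_neg hc]

-- PySem.Chars.replace.go with a one-char pattern and empty replacement is filter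
theorem replace_go_space (fuel : Nat) (l acc : List Char) (hf : l.length ≤ fuel) :
    PySem.Chars.replace.go [' '] [] fuel l acc =
      acc.reverse ++ l.filter (· ≠ ' ') := by
  induction fuel generalizing l acc with
  | zero =>
    have : l = [] := by
      cases l with
      | nil => rfl
      | cons c t => simp at hf
    subst this
    simp [PySem.Chars.replace.go]
  | succ n ih =>
    cases l with
    | nil => simp [PySem.Chars.replace.go]
    | cons c t =>
      by_cases hc : c = ' '
      · have hpre : [' '].isPrefixOf (c :: t) = true := by
          simp [List.isPrefixOf, hc]
        rw [PySem.Chars.replace.go, if_pos hpre]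
        simp only [List.length_cons, List.length_nil, List.drop_succ_cons,
          List.drop_zero, List.reverse_nil, List.nil_append]
        rw [ih t acc (by simp at hf; omega)]
        simp [hc]
      · have hpre : [' '].isPrefixOf (c :: t) = false := by
          simp [List.isPrefixOf]
          intro h; exact absurd h.symm hc
        rw [PySem.Chars.replace.go, if_neg (by simp [hpre])]
        rw [ih t (c :: acc) (by simp at hf; omega)]
        simp [hc]

theorem replace_space_length (s : List Char) :
    (PySem.Chars.replace s [' '] []).length = (s.filter (· ≠ ' ')).length := by
  rw [PySem.Chars.replace]
  simp only [List.isEmpty_cons]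
  rw [replace_go_space s.length s [] (le_refl _)]
  simp

theorem length_filter_add_countP (s : List Char) :
    (s.filter (· ≠ ' ')).length + s.countP (· = ' ') = s.length := by
  induction s with
  | nil => simp
  | cons c t ih =>
    by_cases hc : c = ' ' <;> simp [hc] at ih ⊢ <;> omega

-- ===== VERDICT (by name: the statement is the Claim_ definition above) =====
theorem median_space_spec : Claim_equal_median_space := by
  intro txt _ hpre
  simp only [Spec_median_space, median_space, median_space_alt]
  set s := txt.toList with hs
  have hcnt : 1 ≤ s.countP (· = ' ') := List.countP_pos_iff.mpr ⟨' ', hpre, by simp⟩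
  have hone : (" " : String).toList = [' '] := by decide
  have hrep : PySem.Str.len (PySem.Str.replace txt " " "") =
      ((s.filter (· ≠ ' ')).length : Int) := by
    rw [PySem.Str.len_eq, PySem.Str.toList_replace, hone]
    have : ("" : String).toList = [] := by decide
    rw [this, replace_space_length]
  have hlen : PySem.Str.len txt = (s.length : Int) := by rw [PySem.Str.len_eq]
  have hfc := length_filter_add_countP s
  have hsc : PySem.Str.len txt - PySem.Str.len (PySem.Str.replace txt " " "") + 1
      = ((s.countP (· = ' ') : Int) + 1) := by
    rw [hrep, hlen]; omega
  rw [hsc]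
  have hne : ((s.countP (· = ' ') : Int) + 1) ≠ 0 := by positivity
  rw [if_neg hne]
  have hmedpos : 0 < PySem.Int.floordiv ((s.countP (· = ' ') : Int) + 1) 2 := by
    rw [PySem.Int.floordiv_eq_ediv_of_pos (by omega)]
    omega
  rw [loopA_eq_pyGet s _ 0 (-1) hmedpos, filterMap_enumerate_eq_spIdx s 0]
  have hlenidx : PySem.List.len (spIdx s 0) = ((s.countP (· = ' ') : Int)) := by
    rw [PySem.List.len_eq, spIdx_length]
  rw [hlenidx]
  norm_num
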